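-- pv_equiv track=rewrite | github.com/alanjiang/compare | scripts/function_extract.py | validate_variable_fallin_quoatations
-- ===== SOURCE A (Python) =====
-- def getTemVariable(variable):
--
--    size = len(variable)
--    str=''
--    for i in range(0,size):
--     str+='^'
--    return str
--
-- def validate_variable_fallin_quoatations(index,row,char):
--
--     variables  = find_quoatations(row,char)
--
--     if len(variables) == 0: #没有双引号,变量的索引未落在双引号的区间
--
--         return False
--
--     found = False
--     for tpl in variables:
--
--         if index > tpl[0] and index < tpl[1]:
--
--             found = True
--             break
--
--     return found
--
-- def find_quoatations(row,char):
--
--    variables = []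
--    commas = []
--    commas = find_char_position(row,char,commas)
--
--    if  commas is None:
--        return variables
--    size = len(commas)
--
--    if size == 0:# 没有char符号
--
--       return variables
--
--    elif size > 0:
--
--        if (size % 2) != 0:
--
--          return variables
--
--        for i in range(0,size-1,2):
--
--            for j in range (i+1,size):
--
--                 variables.append( (commas[i],commas[j]))
--                 break
--
--    return  variables
--
-- def find_char_position (str,char,collection):
--
--
--     index  =  str.find(char)
--
--     size = len(char)
--     #得到与char一样长的临时变量
--     tem_variable = getTemVariable(char)
--     if index == -1:
--         return collection
--     else:
--
--        collection.append(index)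
--        new_str = '{}{}{}'.format(str[0:index],tem_variable,str[(index+size):])
--
--        return find_char_position (new_str,char,collection)
-- ===== SOURCE B (Python) =====
-- def validate_variable_fallin_quoatations(index, row, char):
--     # single forward scan collecting occurrence positions, then a parity toggle
--     positions = []
--     start = 0
--     while True:
--         i = row.find(char, start)
--         if i < 0:
--             break
--         positions.append(i)
--         start = i + len(char)
--     if len(positions) % 2 != 0:
--         return False
--     if index in positions:
--         return False
--     inside = False
--     for p in positions:
--         if p < index:
--             inside = not inside
--     return inside
-- ===== Notes on version B (the rewrite author's own statement) =====
-- stated objective: faster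
-- what changed: B collects occurrence positions with a stepping row.find(char, start) loop over the original string and decides membership by a parity toggle (with an exact-boundary and odd-count guard), instead of A's recursive rebuild of the whole string with a '^' sentinel after every match followed by building explicit interval pairs and scanning them.
-- outside the precondition, e.g. on validate_variable_fallin_quoatations(2, 'aa^a^', 'a^'): A returns False, B returns True
import Mathlib
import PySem

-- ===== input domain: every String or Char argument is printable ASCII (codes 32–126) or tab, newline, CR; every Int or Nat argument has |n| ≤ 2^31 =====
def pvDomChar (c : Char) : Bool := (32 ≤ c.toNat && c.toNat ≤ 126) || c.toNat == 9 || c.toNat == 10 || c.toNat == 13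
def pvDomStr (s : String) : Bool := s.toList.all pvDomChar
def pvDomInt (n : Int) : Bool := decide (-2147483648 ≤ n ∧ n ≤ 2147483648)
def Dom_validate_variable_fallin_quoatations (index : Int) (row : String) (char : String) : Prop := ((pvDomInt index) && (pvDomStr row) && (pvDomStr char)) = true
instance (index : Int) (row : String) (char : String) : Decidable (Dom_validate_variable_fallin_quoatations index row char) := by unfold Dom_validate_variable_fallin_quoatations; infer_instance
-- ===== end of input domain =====

-- B replaces A's recursive sentinel-rebuild + interval-pair scan by one stepping find loop and a parity toggle (faster: no string copies).

-- ===== PORT A =====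
-- '^' * len(variable), written as A writes it (loop appending one '^' per character)
def getTemVariable (var : List Char) : List Char :=
  (PySem.List.pyRange 0 (var.length : Int) 1).foldl (fun s _ => s ++ ['^']) []

-- A's find_char_position: recursion with the string rebuilt around a '^'-block each step.
-- fuel (length+1) only makes the recursion total; on Pre_ it is never exhausted
-- (each step consumes one occurrence, and a string of length n has at most n occurrences of a nonempty char).
def find_char_position (s c : List Char) (collection : List Int) : Nat → List Int
  | 0 => collection
  | fuel + 1 =>
    let index := PySem.Chars.find s c
    let size : Int := c.length
    let tem := getTemVariable c
    if index = -1 then collection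
    else
      find_char_position
        (PySem.List.slice s (some 0) (some index) ++ tem ++ PySem.List.slice s (some (index + size)) none)
        c (collection ++ [index]) fuel

def find_quoatations (row c : List Char) : List (Int × Int) :=
  let vars0 : List (Int × Int) := []
  let commas := find_char_position row c [] (row.length + 1)
  let size := commas.length
  if size = 0 then vars0
  else if size % 2 ≠ 0 then vars0
  else
    (PySem.List.pyRange 0 ((size : Int) - 1) 2).foldl
      (fun vars i =>
        -- inner 'for j in range(i+1, size): append; break' touches only the first j
        match PySem.List.pyRange (i + 1) (size : Int) 1 with
        | [] => vars
        | j :: _ => vars ++ [(PySem.List.pyGetD commas i 0, PySem.List.pyGetD commas j 0)])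
      vars0

-- 'for tpl in vars0: if …: found = True; break'
def loopA (index : Int) : List (Int × Int) → Bool
  | [] => false
  | t :: rest => if index > t.1 ∧ index < t.2 then true else loopA index rest

def validate_variable_fallin_quoatations (index : Int) (row : String) (char : String) : Bool :=
  let vars0 := find_quoatations row.toList char.toList
  if vars0.length = 0 then false
  else loopA index vars0

-- ===== PORT B =====
-- Source B's while-True find/step loop (fuel length+1 only makes it total, as above)
def bFindPositions (row c : List Char) (start : Int) : Nat → List Int
  | 0 => []
  | fuel + 1 =>
    let i := PySem.Chars.findFrom row c start
    if i < 0 then []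
    else i :: bFindPositions row c (i + (c.length : Int)) fuel

def validate_variable_fallin_quoatations_alt (index : Int) (row : String) (char : String) : Bool :=
  let positions := bFindPositions row.toList char.toList 0 (row.toList.length + 1)
  if positions.length % 2 ≠ 0 then false
  else if positions.contains index then false
  else positions.foldl (fun inside p => if p < index then !inside else inside) false

-- ===== PRECONDITION & SPEC =====
-- Pre_ excludes char = '' (A's recursion never terminates: RecursionError) and any char containing
-- A's sentinel character '^' (the '^'-rebuild then either raises RecursionError — char all '^' and
-- present in row — or manufactures spurious occurrence positions, an artefact of A's implementation).
def Pre_validate_variable_fallin_quoatations (index : Int) (row : String) (char : String) : Prop :=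
  char ≠ "" ∧ '^' ∉ char.toList

instance (index : Int) (row : String) (char : String) : Decidable (Pre_validate_variable_fallin_quoatations index row char) := by
  unfold Pre_validate_variable_fallin_quoatations; infer_instance

def pvWitness_validate_variable_fallin_quoatations : Int × String × String := (2, "\"ab\"", "\"")

def Spec_validate_variable_fallin_quoatations (index : Int) (row : String) (char : String) (out : Bool) : Prop := out = validate_variable_fallin_quoatations_alt index row char
instance (index : Int) (row : String) (char : String) (out : Bool) : Decidable (Spec_validate_variable_fallin_quoatations index row char out) := by unfold Spec_validate_variable_fallin_quoatations; infer_instance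

-- ===== CLAIM (what is proved, stated in full; the proofs are below) =====
def Claim_equal_validate_variable_fallin_quoatations : Prop := ∀ (index : Int) (row : String) (char : String), Dom_validate_variable_fallin_quoatations index row char → Pre_validate_variable_fallin_quoatations index row char → Spec_validate_variable_fallin_quoatations index row char (validate_variable_fallin_quoatations index row char)

-- ===== LEMMAS AND PROOFS =====

theorem pv_witness_ok :
    Dom_validate_variable_fallin_quoatations
      (pvWitness_validate_variable_fallin_quoatations.1)
      (pvWitness_validate_variable_fallin_quoatations.2.1)
      (pvWitness_validate_variable_fallin_quoatations.2.2) ∧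
    Pre_validate_variable_fallin_quoatations
      (pvWitness_validate_variable_fallin_quoatations.1)
      (pvWitness_validate_variable_fallin_quoatations.2.1)
      (pvWitness_validate_variable_fallin_quoatations.2.2) := by
  constructor <;> decide

def pvNP (c u t : List Char) : Prop := ∀ p < u.length, ¬ c <+: (u ++ t).drop p

theorem pv_find_eq_of (s c : List Char) (p : Nat) (h1 : c <+: s.drop p)
    (h2 : ∀ i < p, ¬ c <+: s.drop i) : PySem.Chars.find s c = (p : Int) := by
  have hinf : c <:+: s := by
    rw [← PySem.Chars.isIn_iff_infix, ← PySem.Chars.exists_prefix_drop_iff_isIn]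
    exact ⟨p, h1⟩
  have hnn : 0 ≤ PySem.Chars.find s c := (PySem.Chars.find_nonneg_iff s c).2 hinf
  obtain ⟨hpre, hmin⟩ := PySem.Chars.find_spec hnn
  rcases lt_trichotomy (PySem.Chars.find s c).toNat p with h | h | h
  · exact absurd hpre (h2 _ h)
  · omega
  · exact absurd h1 (hmin _ h)

theorem pv_window_caret {c s : List Char} {p : Nat} (h : c <+: s.drop p) (j : Nat)
    (hj : j < s.length) (hpj : p ≤ j) (hjc : j < p + c.length) (hcar : s[j] = '^') :
    '^' ∈ c := by
  have hlen : c.length ≤ s.length - p := by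
    have := h.length_le; simpa using this
  have hi : j - p < c.length := by omega
  have hd : j - p < (s.drop p).length := by simp; omega
  have h2 := h.getElem hi
  rw [List.getElem_drop] at h2
  have hj' : p + (j - p) = j := by omega
  simp only [hj'] at h2
  rw [← hcar, ← h2]
  exact List.getElem_mem hi

theorem pv_prefix_drop_agree {c : List Char} {s₁ s₂ : List Char} {n p : Nat}
    (hagree : s₁.take n = s₂.take n) (hpc : p + c.length ≤ n) :
    c <+: s₁.drop p ↔ c <+: s₂.drop p := by
  have key : ∀ s : List Char, (s.drop p).take c.length = ((s.take n).drop p).take c.length := by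
    intro s
    rw [List.drop_take, List.take_take]
    congr 1
    omega
  rw [List.prefix_iff_eq_take, List.prefix_iff_eq_take, key s₁, key s₂, hagree]

theorem pv_find_append_NP {c u t : List Char} (hnp : pvNP c u t) :
    PySem.Chars.find (u ++ t) c =
      if PySem.Chars.find t c = -1 then -1 else (u.length : Int) + PySem.Chars.find t c := by
  have hdrop : ∀ m : Nat, (u ++ t).drop (u.length + m) = t.drop m := by
    intro m
    rw [List.drop_append]
    simp
  split
  · next h =>
    rw [PySem.Chars.find_eq_neg_one_iff] at h ⊢
    intro hinf
    obtain ⟨p, hp⟩ := (PySem.Chars.exists_prefix_drop_iff_isIn c (u ++ t)).2 ((PySem.Chars.isIn_iff_infix c (u++t)).2 hinf)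
    rcases Nat.lt_or_ge p u.length with hlt | hge
    · exact hnp p hlt hp
    · apply h
      rw [← PySem.Chars.isIn_iff_infix, ← PySem.Chars.exists_prefix_drop_iff_isIn]
      refine ⟨p - u.length, ?_⟩
      have : u.length + (p - u.length) = p := by omega
      rw [← this, hdrop] at hp
      exact hp
  · next h =>
    have hnn : 0 ≤ PySem.Chars.find t c := by
      have := PySem.Chars.neg_one_le_find t c; omega
    obtain ⟨hpre, hmin⟩ := PySem.Chars.find_spec hnn
    set f := (PySem.Chars.find t c).toNat with hfdef
    have hval : PySem.Chars.find t c = (f : Int) := by omega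
    rw [hval]
    have : ((u.length : Int) + f) = ((u.length + f : Nat) : Int) := by push_cast; ring
    rw [this]
    apply pv_find_eq_of
    · rw [hdrop]; exact hpre
    · intro i hi hip
      rcases Nat.lt_or_ge i u.length with hlt | hge
      · exact hnp i hlt hip
      · have : u.length + (i - u.length) = i := by omega
        rw [← this, hdrop] at hip
        exact hmin _ (by omega) hip

theorem pv_NP_step {c u t : List Char} (hc : c ≠ []) (hcar : '^' ∉ c) (hnp : pvNP c u t)
    (hf : 0 ≤ PySem.Chars.find t c) :
    pvNP c (u ++ t.take (PySem.Chars.find t c).toNat ++ List.replicate c.length '^')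
      (t.drop ((PySem.Chars.find t c).toNat + c.length)) := by
  obtain ⟨hpre, hmin⟩ := PySem.Chars.find_spec hf
  set f := (PySem.Chars.find t c).toNat with hfdef
  have hclen : 0 < c.length := List.length_pos_iff.2 hc
  have hfle : f + c.length ≤ t.length := by
    have := hpre.length_le; simp at this; omega
  intro p hp hpref
  have hulen : (u ++ t.take f ++ List.replicate c.length '^').length = u.length + f + c.length := by
    simp; omega
  rw [hulen] at hp
  have hassoc : (u ++ t.take f ++ List.replicate c.length '^') ++ t.drop (f + c.length)
      = (u ++ t.take f) ++ (List.replicate c.length '^' ++ t.drop (f + c.length)) := by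
    simp
  have hlen1 : (u ++ t.take f).length = u.length + f := by simp; omega
  rw [hassoc] at hpref
  rcases Nat.lt_or_ge (p + c.length) (u.length + f + 1) with hA | hB
  · -- window inside the unchanged prefix
    have e1 : ((u ++ t.take f) ++ (List.replicate c.length '^' ++ t.drop (f + c.length))).take (u.length + f)
        = u ++ t.take f := by
      rw [List.take_append_of_le_length (le_of_eq hlen1.symm), ← hlen1, List.take_length]
    have e2 : (u ++ t).take (u.length + f) = u ++ t.take f := by
      rw [List.take_append]
      congr 1
      · exact List.take_of_length_le (by omega)
      · congr 1; omega
    have hagree := e1.trans e2.symm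
    have hpref' : c <+: (u ++ t).drop p :=
      (pv_prefix_drop_agree hagree (by omega)).1 hpref
    rcases Nat.lt_or_ge p u.length with hlt | hge
    · exact hnp p hlt hpref'
    · have hdrop : (u ++ t).drop p = t.drop (p - u.length) := by
        rw [List.drop_append]
        simp [List.drop_eq_nil_of_le (by omega : u.length ≤ p)]
      rw [hdrop] at hpref'
      exact hmin (p - u.length) (by omega) hpref'
  · -- window covers a '^' of the replicate block
    have hslen : ((u ++ t.take f) ++ (List.replicate c.length '^' ++ t.drop (f + c.length))).length
        = u.length + t.length := by simp; omega
    set j := max p (u.length + f) with hj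
    have hjlt : j < u.length + f + c.length := by omega
    have hjs : j < ((u ++ t.take f) ++ (List.replicate c.length '^' ++ t.drop (f + c.length))).length := by omega
    have h9 : ((u ++ t.take f) ++ (List.replicate c.length '^' ++ t.drop (f + c.length)))[j]? = some '^' := by
      rw [List.getElem?_append_right (by omega), List.getElem?_append_left (by simp [hlen1]; omega)]
      rw [List.getElem?_replicate, if_pos (by simp [hlen1]; omega)]
    have hcaret : ((u ++ t.take f) ++ (List.replicate c.length '^' ++ t.drop (f + c.length)))[j]'hjs = '^' := by
      have := List.getElem?_eq_getElem hjs
      rw [h9] at this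
      exact (Option.some_injective _ this).symm
    exact hcar (pv_window_caret hpref j hjs (by omega) (by omega) hcaret)

theorem pv_getTem (c : List Char) : getTemVariable c = List.replicate c.length '^' := by
  unfold getTemVariable
  rw [PySem.List.foldl_append_singleton_eq_map (fun _ => '^')]
  simp [PySem.List.pyRange_one, Function.comp_def, List.map_const']

theorem pv_sync (c : List Char) (hc : c ≠ []) (hcar : '^' ∉ c) (row : List Char) :
    ∀ (fuel : Nat) (u : List Char) (k : Nat) (acc : List Int),
    u.length = k → k ≤ row.length → pvNP c u (row.drop k) →
    find_char_position (u ++ row.drop k) c acc fuel =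
      acc ++ bFindPositions row c (k : Int) fuel := by
  intro fuel
  induction fuel with
  | zero => intro u k acc _ _ _; simp [find_char_position, bFindPositions]
  | succ fuel ih =>
    intro u k acc hlen hk hnp
    have hfind := pv_find_append_NP hnp
    have hfrom : PySem.Chars.findFrom row c (k : Int) =
        if PySem.Chars.find (row.drop k) c = -1 then -1 else (k : Int) + PySem.Chars.find (row.drop k) c :=
      PySem.Chars.findFrom_natCast row c k hk
    rw [find_char_position, bFindPositions]
    by_cases hneg : PySem.Chars.find (row.drop k) c = -1
    · rw [if_pos (by rw [hfind, if_pos hneg]), if_pos (by rw [hfrom, if_pos hneg]; norm_num)]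
      simp
    · -- a match exists
      have hge : 0 ≤ PySem.Chars.find (row.drop k) c := by
        have := PySem.Chars.neg_one_le_find (row.drop k) c
        omega
      set f := (PySem.Chars.find (row.drop k) c).toNat with hfdef
      have hfval : PySem.Chars.find (row.drop k) c = (f : Int) := by omega
      have hidx : PySem.Chars.find (u ++ row.drop k) c = ((k + f : Nat) : Int) := by
        rw [hfind, if_neg hneg, hlen, hfval]; push_cast; ring
      have hi : PySem.Chars.findFrom row c (k : Int) = ((k + f : Nat) : Int) := by
        rw [hfrom, if_neg hneg, hfval]; push_cast; ring
      obtain ⟨hpre, _⟩ := PySem.Chars.find_spec hge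
      have hclen : 0 < c.length := List.length_pos_iff.2 hc
      have hfle : f + c.length ≤ (row.drop k).length := by
        have := hpre.length_le; simp at this; simp; omega
      have hfle' : f + c.length ≤ row.length - k := by simpa using hfle
      rw [if_neg (by rw [hidx]; omega), if_neg (by rw [hi]; push_cast; omega)]
      rw [hidx, hi]
      -- rewrite the rebuilt string
      have hslice1 : PySem.List.slice (u ++ row.drop k) (some 0) (some ((k + f : Nat) : Int))
          = u ++ (row.drop k).take f := by
        rw [PySem.List.slice_zero_start, PySem.List.slice_to _ (by positivity)]
        rw [Int.toNat_natCast, List.take_append]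
        congr 1
        · exact List.take_of_length_le (by omega)
        · congr 1; omega
      have hslice2 : PySem.List.slice (u ++ row.drop k) (some (((k + f : Nat) : Int) + (c.length : Int))) none
          = (row.drop k).drop (f + c.length) := by
        rw [PySem.List.slice_from _ (by positivity)]
        have : (((k + f : Nat) : Int) + (c.length : Int)).toNat = k + (f + c.length) := by
          push_cast; omega
        rw [this, List.drop_append]
        rw [List.drop_eq_nil_of_le (by omega), List.nil_append]
        congr 1; omega
      rw [hslice1, hslice2, pv_getTem]
      have hdd : (row.drop k).drop (f + c.length) = row.drop (k + f + c.length) := by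
        rw [List.drop_drop]; congr 1; omega
      have harr : u ++ (row.drop k).take f ++ List.replicate c.length '^' ++ (row.drop k).drop (f + c.length)
          = (u ++ (row.drop k).take f ++ List.replicate c.length '^') ++ row.drop (k + f + c.length) := by
        rw [← hdd]
      rw [harr]
      have hrec := ih (u ++ (row.drop k).take f ++ List.replicate c.length '^') (k + f + c.length)
        (acc ++ [((k + f : Nat) : Int)])
        (by simp; omega) (by omega)
        (by
          have := pv_NP_step hc hcar hnp hge
          rw [← hfdef] at this
          rwa [hdd] at this)
      rw [hrec]
      have : ((k + f : Nat) : Int) + (c.length : Int) = ((k + f + c.length : Nat) : Int) := by push_cast; ring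
      rw [this]
      simp

theorem pv_bFind_sorted (row c : List Char) (hc : c ≠ []) :
    ∀ (fuel : Nat) (k : Nat), k ≤ row.length →
    (∀ x ∈ bFindPositions row c (k : Int) fuel, (k : Int) ≤ x) ∧
      (bFindPositions row c (k : Int) fuel).Pairwise (· < ·) := by
  intro fuel
  induction fuel with
  | zero => intro k _; simp [bFindPositions]
  | succ fuel ih =>
    intro k hk
    rw [bFindPositions]
    have hfrom : PySem.Chars.findFrom row c (k : Int) =
        if PySem.Chars.find (row.drop k) c = -1 then -1 else (k : Int) + PySem.Chars.find (row.drop k) c :=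
      PySem.Chars.findFrom_natCast row c k hk
    by_cases hneg : PySem.Chars.find (row.drop k) c = -1
    · rw [if_pos (by rw [hfrom, if_pos hneg]; norm_num)]
      simp
    · have hge : 0 ≤ PySem.Chars.find (row.drop k) c := by
        have := PySem.Chars.neg_one_le_find (row.drop k) c; omega
      set f := (PySem.Chars.find (row.drop k) c).toNat with hfdef
      have hfval : PySem.Chars.find (row.drop k) c = (f : Int) := by omega
      have hi : PySem.Chars.findFrom row c (k : Int) = ((k + f : Nat) : Int) := by
        rw [hfrom, if_neg hneg, hfval]; push_cast; ring
      obtain ⟨hpre, _⟩ := PySem.Chars.find_spec hge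
      have hclen : 0 < c.length := List.length_pos_iff.2 hc
      have hfle : f + c.length ≤ row.length - k := by
        have := hpre.length_le; simp at this; omega
      rw [if_neg (by rw [hi]; push_cast; omega), hi]
      have hcast : ((k + f : Nat) : Int) + (c.length : Int) = ((k + f + c.length : Nat) : Int) := by
        push_cast; ring
      rw [hcast]
      obtain ⟨hlb, hpw⟩ := ih (k + f + c.length) (by omega)
      refine ⟨?_, ?_⟩
      · intro x hx
        rcases List.mem_cons.1 hx with rfl | hx'
        · push_cast; omega
        · have := hlb x hx'; push_cast at this ⊢; omega
      · refine List.pairwise_cons.2 ⟨?_, hpw⟩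
        intro x hx
        have := hlb x hx
        push_cast at this ⊢; omega

def pairUp : List Int → List (Int × Int)
  | a :: b :: rest => (a, b) :: pairUp rest
  | _ => []

theorem pv_map_getD_pairUp : ∀ (l : List Int), l.length % 2 = 0 →
    (List.range (l.length / 2)).map (fun k => (l.getD (2 * k) 0, l.getD (2 * k + 1) 0)) = pairUp l
  | [] => by intro _; simp [pairUp]
  | [a] => by intro h; simp at h
  | a :: b :: rest => by
    intro h
    have hr : rest.length % 2 = 0 := by simp at h; omega
    have hlen : (a :: b :: rest).length / 2 = rest.length / 2 + 1 := by simp; omega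
    rw [hlen, List.range_succ_eq_map, List.map_cons, List.map_map]
    rw [pairUp]
    congr 1
    rw [← pv_map_getD_pairUp rest hr]
    apply List.map_congr_left
    intro k _
    simp only [Function.comp_apply, List.getD_eq_getElem?_getD, Prod.mk.injEq, Nat.succ_eq_add_one]
    constructor
    · rw [show 2 * (k + 1) = (2 * k + 1) + 1 by ring]
      rw [List.getElem?_cons_succ, List.getElem?_cons_succ]
    · rw [show 2 * (k + 1) + 1 = ((2 * k + 1) + 1) + 1 by ring]
      rw [List.getElem?_cons_succ, List.getElem?_cons_succ]

theorem pv_pairs_eq (commas : List Int) (hne : commas ≠ []) (h : commas.length % 2 = 0) :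
    (PySem.List.pyRange 0 ((commas.length : Int) - 1) 2).foldl
      (fun vars i =>
        match PySem.List.pyRange (i + 1) (commas.length : Int) 1 with
        | [] => vars
        | j :: _ => vars ++ [(PySem.List.pyGetD commas i 0, PySem.List.pyGetD commas j 0)]) [] =
      pairUp commas := by
  have hn2 : 2 ≤ commas.length := by
    cases commas with
    | nil => simp at hne
    | cons x xs => cases xs with
      | nil => simp at h
      | cons y ys => simp
  set n := commas.length with hn
  have hif : (if (0 : Int) < (n : Int) - 1 then (((n : Int) - 1 - 0 + 2 - 1) / 2).toNat else 0) = n / 2 := by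
    rw [if_pos (by push_cast; omega)]
    omega
  have hrange : PySem.List.pyRange 0 ((n : Int) - 1) 2 =
      (List.range (n / 2)).map (fun k : Nat => (0 : Int) + 2 * (k : Int)) := by
    rw [PySem.List.pyRange_of_pos _ _ (by norm_num : (0:Int) < 2), hif]
  rw [hrange, List.foldl_map]
  have hbody : ∀ (vars : List (Int × Int)), ∀ k ∈ List.range (n / 2),
      (match PySem.List.pyRange ((0 : Int) + 2 * (k : Int) + 1) (n : Int) 1 with
        | [] => vars
        | j :: _ => vars ++ [(PySem.List.pyGetD commas ((0 : Int) + 2 * (k : Int)) 0, PySem.List.pyGetD commas j 0)]) =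
      vars ++ [(commas.getD (2 * k) 0, commas.getD (2 * k + 1) 0)] := by
    intro vars k hk
    rw [List.mem_range] at hk
    have hlt : (0 : Int) + 2 * (k : Int) + 1 < (n : Int) := by push_cast; omega
    rw [PySem.List.pyRange_one_cons hlt]
    show vars ++ [(PySem.List.pyGetD commas ((0 : Int) + 2 * (k : Int)) 0,
        PySem.List.pyGetD commas ((0 : Int) + 2 * (k : Int) + 1) 0)] = _
    have e1 : (0 : Int) + 2 * (k : Int) = ((2 * k : Nat) : Int) := by push_cast; ring
    have e2 : (0 : Int) + 2 * (k : Int) + 1 = ((2 * k + 1 : Nat) : Int) := by push_cast; ring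
    rw [e2, e1, PySem.List.pyGetD_natCast, PySem.List.pyGetD_natCast]
  rw [PySem.List.foldl_congr_mem _ _ _ _ ?hcong]
  case hcong => intro vars k hk; exact hbody vars k hk
  rw [PySem.List.foldl_append_singleton_eq_map (fun k => (commas.getD (2 * k) 0, commas.getD (2 * k + 1) 0))]
  rw [List.nil_append]
  exact pv_map_getD_pairUp commas h

theorem pv_loopA_false (index : Int) : ∀ (ps : List Int), (∀ x ∈ ps, index ≤ x) →
    loopA index (pairUp ps) = false
  | [] => by intro _; simp [pairUp, loopA]
  | [a] => by intro _; simp [pairUp, loopA]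
  | a :: b :: rest => by
    intro h
    rw [pairUp, loopA]
    rw [if_neg (by simp; intro ha; exact absurd (h a (by simp)) (by simpa using ha))]
    exact pv_loopA_false index rest (fun x hx => h x (by simp [hx]))

theorem pv_toggle_const (index : Int) (ps : List Int) (b : Bool)
    (h : ∀ x ∈ ps, ¬ x < index) :
    ps.foldl (fun inside p => if p < index then !inside else inside) b = b := by
  induction ps generalizing b with
  | nil => rfl
  | cons a rest ih =>
    simp only [List.foldl_cons]
    rw [if_neg (h a (by simp))]
    exact ih b (fun x hx => h x (List.mem_cons_of_mem a hx))

theorem pv_core (index : Int) : ∀ (ps : List Int), ps.Pairwise (· < ·) → ps.length % 2 = 0 →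
    loopA index (pairUp ps) =
      (!ps.contains index && ps.foldl (fun inside p => if p < index then !inside else inside) false)
  | [] => by intro _ _; simp [pairUp, loopA]
  | [a] => by intro _ h; simp at h
  | a :: b :: rest => by
    intro hpw h
    have hr : rest.length % 2 = 0 := by simp at h; omega
    have hab : a < b := (List.pairwise_cons.1 hpw).1 b (by simp)
    have harest : ∀ x ∈ rest, a < x := fun x hx => (List.pairwise_cons.1 hpw).1 x (by simp [hx])
    have hbrest : ∀ x ∈ rest, b < x :=
      fun x hx => (List.pairwise_cons.1 (List.pairwise_cons.1 hpw).2).1 x hx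
    have hpwr : rest.Pairwise (· < ·) := (List.pairwise_cons.1 (List.pairwise_cons.1 hpw).2).2
    rw [pairUp, loopA]
    simp only [List.foldl_cons, List.contains_cons]
    rcases lt_trichotomy index a with hia | hia | hia
    · -- index < a : everything false
      have hna : ¬ index = a := by omega
      have hnb : ¬ index = b := by omega
      have hnm : index ∉ rest := fun hm => absurd (hbrest index hm) (by omega)
      rw [if_neg (by simp; intro hgt; omega)]
      rw [pv_loopA_false index rest (fun x hx => le_of_lt (lt_trans hia (harest x hx)))]
      rw [if_neg (by omega), if_neg (by omega)]
      rw [pv_toggle_const index rest false (fun x hx => by have := hbrest x hx; omega)]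
      simp
    · -- index = a
      subst hia
      rw [if_neg (by simp)]
      rw [pv_loopA_false index rest (fun x hx => le_of_lt (lt_trans hab (hbrest x hx)))]
      simp
    · rcases lt_trichotomy index b with hib | hib | hib
      · -- a < index < b : inside
        have hna : ¬ index = a := by omega
        have hnb : ¬ index = b := by omega
        have hnm : index ∉ rest := fun hm => absurd (hbrest index hm) (by omega)
        rw [if_pos ⟨hia, hib⟩]
        rw [if_pos hia, if_neg (by omega)]
        rw [pv_toggle_const index rest (!false) (fun x hx => by have := hbrest x hx; omega)]
        rw [beq_false_of_ne hna, beq_false_of_ne hnb]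
        simp [hnm]
      · -- index = b
        subst hib
        rw [if_neg (by simp)]
        rw [pv_loopA_false index rest (fun x hx => le_of_lt (hbrest x hx))]
        simp
      · -- b < index : recurse
        have hna : ¬ index = a := by omega
        have hnb : ¬ index = b := by omega
        rw [if_neg (by simp; intro _; omega)]
        rw [if_pos hia, if_pos hib]
        simp only [Bool.not_false, Bool.not_true]
        rw [pv_core index rest hpwr hr]
        rw [beq_false_of_ne hna, beq_false_of_ne hnb]
        simp

-- ===== VERDICT (by name: the statement is the Claim_ definition above) =====
theorem validate_variable_fallin_quoatations_spec : Claim_equal_validate_variable_fallin_quoatations := by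
  intro index row char _ hpre
  obtain ⟨hne, hcar⟩ := hpre
  unfold Spec_validate_variable_fallin_quoatations
  have hcne : char.toList ≠ [] := by simp [String.toList_eq_nil_iff, hne]
  have hsync := pv_sync char.toList hcne hcar row.toList (row.toList.length + 1) [] 0 [] rfl
    (by omega) (by intro p hp; simp at hp)
  have hcommas : find_char_position row.toList char.toList [] (row.toList.length + 1) =
      bFindPositions row.toList char.toList 0 (row.toList.length + 1) := by
    simpa using hsync
  obtain ⟨hlb, hpw⟩ := pv_bFind_sorted row.toList char.toList hcne (row.toList.length + 1) 0 (by omega)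
  simp only [Nat.cast_zero] at hlb hpw
  set ps := bFindPositions row.toList char.toList 0 (row.toList.length + 1) with hps
  simp only [validate_variable_fallin_quoatations, validate_variable_fallin_quoatations_alt, ← hps]
  by_cases h0 : ps = []
  · have hfq : find_quoatations row.toList char.toList = [] := by
      simp only [find_quoatations, hcommas, h0]
      simp
    rw [hfq, h0]
    simp
  by_cases hodd : ps.length % 2 = 0
  · -- even, nonempty: A's pairs become pairUp ps, then the core lemma
    have hfq : find_quoatations row.toList char.toList = pairUp ps := by
      simp only [find_quoatations, hcommas, ← hps]
      rw [if_neg (by simpa using fun h => h0 (List.length_eq_zero_iff.1 h)),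
          if_neg (by omega)]
      exact pv_pairs_eq ps h0 hodd
    rw [hfq]
    obtain ⟨a, b, rest, h2⟩ : ∃ a b rest, ps = a :: b :: rest := by
      match ps, h0, hodd with
      | a :: b :: rest, _, _ => exact ⟨a, b, rest, rfl⟩
      | [a], _, h => simp at h
    rw [h2] at hpw hodd ⊢
    rw [if_neg (by simp [pairUp])]
    rw [pv_core index (a :: b :: rest) hpw hodd]
    rw [if_neg (by omega : ¬ (a :: b :: rest).length % 2 ≠ 0)]
    cases hct : (a :: b :: rest).contains index <;> simp
  · -- odd length: both sides return False
    have hfq : find_quoatations row.toList char.toList = [] := by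
      simp only [find_quoatations, hcommas, ← hps]
      rw [if_neg (by simpa using fun h => h0 (List.length_eq_zero_iff.1 h)),
          if_pos (by omega)]
    rw [hfq]
    rw [if_pos (by simp : ([] : List (Int × Int)).length = 0)]
    rw [if_pos (show ps.length % 2 ≠ 0 from by omega)]
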